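-- pv_equiv track=rewrite | github.com/JsonE97/duolingo-italian | verb_scripts/ReadRest.py | findCondizionale
-- ===== SOURCE A (Python) =====
-- def findCondizionale(lists, token):
--     presente = []
--     passato = []
--     for entry in lists:
--         if entry.find('Presente') != -1:
--             index = lists.index(entry)
--             if index != -1:
--                 presente = lists[index+1:index+7]
--                 break
--     for entry in lists:
--         if entry.find('Passato') != -1:
--             index = lists.index(entry)
--             if index != -1:
--                 passato = lists[index+1:index+7]
--                 break
--     return presente, passato
-- ===== SOURCE B (Python) =====
-- def findCondizionale(lists, token):
--     pi = None
--     pa = None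
--     for i, entry in enumerate(lists):
--         if pi is None and entry.find('Presente') != -1:
--             pi = i
--         if pa is None and entry.find('Passato') != -1:
--             pa = i
--     presente = lists[pi + 1:pi + 7] if pi is not None else []
--     passato = lists[pa + 1:pa + 7] if pa is not None else []
--     return presente, passato
-- ===== Notes on version B (the rewrite author's own statement) =====
-- stated objective: alternative
-- what changed: One enumerate pass recording the first Presente and first Passato indices replaces A's two scan loops that each call lists.index(entry) (a second scan) before slicing.
import Mathlib
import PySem

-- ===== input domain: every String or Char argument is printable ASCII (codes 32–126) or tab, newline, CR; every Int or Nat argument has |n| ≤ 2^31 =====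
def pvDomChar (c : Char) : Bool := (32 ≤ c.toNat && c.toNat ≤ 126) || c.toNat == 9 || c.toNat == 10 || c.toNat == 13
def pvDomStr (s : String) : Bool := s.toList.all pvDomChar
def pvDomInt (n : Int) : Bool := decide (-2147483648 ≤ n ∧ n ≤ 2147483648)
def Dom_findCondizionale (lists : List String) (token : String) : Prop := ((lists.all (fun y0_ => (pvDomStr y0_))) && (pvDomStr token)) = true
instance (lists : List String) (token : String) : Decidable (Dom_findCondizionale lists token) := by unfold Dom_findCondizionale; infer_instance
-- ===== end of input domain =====

-- B replaces A's two scans (each rescanning with lists.index) by one enumerate pass recording both first-match indices; return value only, no mutation.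

-- ===== PORT A =====
-- A's loop: scan `suf` (a suffix of the original `orig`); on the first entry containing
-- `pat`, recompute its index via lists.index(entry) and slice; `index != -1` is kept.
-- The `none` branch of index? is Python's ValueError from lists.index — unreachable
-- since entry ∈ lists; [] (the loop variable's initial value) stands in for it.
def scanA (orig : List String) (pat : String) : List String → List String
  | [] => []
  | e :: rest =>
    if PySem.Str.find e pat ≠ -1 then
      match PySem.List.index? orig e with
      | some idx =>
        if (idx : Int) ≠ -1 then
          PySem.List.slice orig (some ((idx : Int) + 1)) (some ((idx : Int) + 7))
        else scanA orig pat rest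
      | none => []
    else scanA orig pat rest

def findCondizionale (lists : List String) (token : String) : List String × List String :=
  (scanA lists "Presente" lists, scanA lists "Passato" lists)

-- ===== PORT B =====
-- one component of the loop body: record the index the first time pat is found
def step1 (pat : String) (o : Option Int) (ie : Int × String) : Option Int :=
  if o = none ∧ PySem.Str.find ie.2 pat ≠ -1 then some ie.1 else o

def stepB (st : Option Int × Option Int) (ie : Int × String) : Option Int × Option Int :=
  (step1 "Presente" st.1 ie, step1 "Passato" st.2 ie)

def findCondizionale_alt (lists : List String) (token : String) : List String × List String :=
  let st := (PySem.List.enumerate lists 0).foldl stepB (none, none)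
  (match st.1 with
   | some i => PySem.List.slice lists (some (i + 1)) (some (i + 7))
   | none => [],
   match st.2 with
   | some i => PySem.List.slice lists (some (i + 1)) (some (i + 7))
   | none => [])

-- ===== PRECONDITION & SPEC =====
def Spec_findCondizionale (lists : List String) (token : String) (out : List String × List String) : Prop := out = findCondizionale_alt lists token
instance (lists : List String) (token : String) (out : List String × List String) : Decidable (Spec_findCondizionale lists token out) := by unfold Spec_findCondizionale; infer_instance

-- ===== CLAIM (what is proved, stated in full; the proofs are below) =====
def Claim_equal_findCondizionale : Prop := ∀ (lists : List String) (token : String), Dom_findCondizionale lists token → Spec_findCondizionale lists token (findCondizionale lists token)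

-- ===== LEMMAS AND PROOFS =====

-- reference: first index whose entry contains pat
def firstIdx (pat : String) (xs : List String) : Option Nat :=
  xs.findIdx? (fun e => PySem.Str.find e pat ≠ -1)

def mkSlice (lists : List String) : Option Nat → List String
  | some k => PySem.List.slice lists (some ((k : Int) + 1)) (some ((k : Int) + 7))
  | none => []

theorem scanA_eq (pat : String) (pre suf : List String)
    (hpre : ∀ x ∈ pre, PySem.Chars.find x.toList pat.toList = -1) :
    scanA (pre ++ suf) pat suf = mkSlice (pre ++ suf) ((firstIdx pat suf).map (· + pre.length)) := by
  induction suf generalizing pre with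
  | nil => simp [scanA, firstIdx, mkSlice]
  | cons e rest ih =>
    by_cases hp : PySem.Chars.find e.toList pat.toList = -1
    · have h2 := ih (pre ++ [e]) (by
        intro x hx
        rcases List.mem_append.mp hx with h | h
        · exact hpre x h
        · simp at h; subst h; exact hp)
      simp only [List.append_nil, List.append_assoc, List.singleton_append] at h2
      have hstep : scanA (pre ++ e :: rest) pat (e :: rest) = scanA (pre ++ e :: rest) pat rest := by
        simp [scanA, hp]
      have hf : firstIdx pat (e :: rest) = (firstIdx pat rest).map (· + 1) := by
        simp [firstIdx, List.findIdx?_cons, hp]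
      rw [hstep, h2, hf]
      cases firstIdx pat rest with
      | none => simp
      | some k =>
        simp only [Option.map_some]
        congr 1
        simp
        omega
    · have hne : e ∉ pre := fun h => hp (hpre e h)
      have hidx : PySem.List.index? (pre ++ e :: rest) e = some pre.length :=
        (PySem.List.index?_eq_some_iff _ _ _).mpr ⟨pre, rest, rfl, rfl, hne⟩
      rw [PySem.List.index?_eq_idxOf?] at hidx
      have hnn : ((pre.length : Int)) ≠ -1 := by omega
      simp [scanA, firstIdx, List.findIdx?_cons, hp, hidx, hnn, mkSlice]

theorem fold1_eq (pat : String) (xs : List String) (s : Int) (o : Option Int) :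
    (PySem.List.enumerate xs s).foldl (step1 pat) o =
      (o.orElse (fun _ => (firstIdx pat xs).map (fun k => s + (k : Int)))) := by
  induction xs generalizing s o with
  | nil => simp [PySem.List.enumerate_nil, firstIdx]
  | cons e rest ih =>
    rw [PySem.List.enumerate_cons, List.foldl_cons, ih]
    cases o with
    | some i => simp [step1, Option.orElse]
    | none =>
      by_cases hp : PySem.Chars.find e.toList pat.toList = -1
      · simp only [step1, firstIdx, List.findIdx?_cons]
        simp [hp, Option.orElse]
        cases List.findIdx? (fun e => !decide (PySem.Chars.find e.toList pat.toList = -1)) rest with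
        | none => rfl
        | some k => simp; omega
      · simp [step1, firstIdx, List.findIdx?_cons, hp, Option.orElse]

theorem foldl_prod {α β γ : Type} (f : α → γ → α) (g : β → γ → β) (l : List γ) (a : α) (b : β) :
    l.foldl (fun st x => (f st.1 x, g st.2 x)) (a, b) = (l.foldl f a, l.foldl g b) := by
  induction l generalizing a b with
  | nil => rfl
  | cons x t ih => simp [List.foldl_cons, ih]

theorem alt_eq (lists : List String) (token : String) :
    findCondizionale_alt lists token =
      (mkSlice lists (firstIdx "Presente" lists), mkSlice lists (firstIdx "Passato" lists)) := by
  unfold findCondizionale_alt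
  have hstep : stepB = fun (st : Option Int × Option Int) ie => (step1 "Presente" st.1 ie, step1 "Passato" st.2 ie) := rfl
  rw [hstep, foldl_prod, fold1_eq, fold1_eq]
  cases h1 : firstIdx "Presente" lists <;> cases h2 : firstIdx "Passato" lists <;>
    simp [h1, h2, mkSlice, Option.orElse]

-- ===== VERDICT (by name: the statement is the Claim_ definition above) =====
theorem findCondizionale_spec : Claim_equal_findCondizionale := by
  intro lists token _
  unfold Spec_findCondizionale
  rw [alt_eq]
  unfold findCondizionale
  have hA : ∀ pat, scanA lists pat lists = mkSlice lists (firstIdx pat lists) := by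
    intro pat
    have := scanA_eq pat [] lists (by simp)
    simpa using this
  rw [hA, hA]
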